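-- pv_equiv track=rewrite | github.com/alexandraback/datacollection | solutions_5631989306621952_1/Python/Kenchy/prob1.py | solve
-- ===== SOURCE A (Python) =====
-- def solve(l):
--     max_pos = 0
--     if len(l) == 0:
--         return ''
--     for idx, num in enumerate(l):
--         if l[idx] >= l[max_pos]:
--             max_pos = idx
--     return l[max_pos] + solve(l[:max_pos]) + l[max_pos + 1:]
-- ===== SOURCE B (Python) =====
-- def solve(l):
--     # One left-to-right pass: a char is "picked" iff it is >= every char before it
--     # (running max); picked chars reversed, then the remaining chars in order.
--     picked = []
--     rest = []
--     best = None
--     for c in l: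
--         if best is None or c >= best:
--             picked.append(c)
--             best = c
--         else:
--             rest.append(c)
--     picked.reverse()
--     return ''.join(picked) + ''.join(rest)
-- ===== Notes on version B (the rewrite author's own statement) =====
-- stated objective: faster
-- what changed: Replaces the recursive repeated argmax-scan (each level rescans the whole prefix) by one left-to-right pass that splits the string into running-maximum records and the rest, then assembles reversed records followed by the untouched chars.
import Mathlib
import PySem

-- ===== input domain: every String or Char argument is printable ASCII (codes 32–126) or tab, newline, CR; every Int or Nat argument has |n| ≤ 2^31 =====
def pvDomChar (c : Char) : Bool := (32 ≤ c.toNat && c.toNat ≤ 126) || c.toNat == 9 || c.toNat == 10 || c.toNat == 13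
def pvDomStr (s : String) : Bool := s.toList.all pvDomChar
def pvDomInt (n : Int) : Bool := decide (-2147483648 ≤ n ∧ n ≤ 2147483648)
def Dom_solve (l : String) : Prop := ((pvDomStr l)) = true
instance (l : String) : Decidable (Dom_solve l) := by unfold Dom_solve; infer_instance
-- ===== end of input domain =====

-- B replaces A's recursive repeated argmax-scan by one linear pass (running-maximum records reversed, then the rest); same return value.

-- ===== PORT A =====
-- Python's loop `for idx, num in enumerate(l): if l[idx] >= l[max_pos]: max_pos = idx`
-- over the characters of l (comparison of single-char strings = Char comparison).
def mpA (cs : List Char) : Int :=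
  (PySem.List.enumerate cs 0).foldl
    (fun m p => if PySem.List.pyGetD cs p.1 ' ' ≥ PySem.List.pyGetD cs m ' ' then p.1 else m) 0

-- the fold keeps its accumulator inside [0, L): needed for solveLA's termination
theorem mpA_fold_bounds (cs : List Char) (L : Int) :
    ∀ (ps : List (Int × Char)) (m : Int), (∀ p ∈ ps, 0 ≤ p.1 ∧ p.1 < L) → 0 ≤ m → m < L →
      0 ≤ ps.foldl (fun m p => if PySem.List.pyGetD cs p.1 ' ' ≥ PySem.List.pyGetD cs m ' ' then p.1 else m) m ∧
      ps.foldl (fun m p => if PySem.List.pyGetD cs p.1 ' ' ≥ PySem.List.pyGetD cs m ' ' then p.1 else m) m < L := by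
  intro ps
  induction ps with
  | nil => intro m _ h0 h1; exact ⟨h0, h1⟩
  | cons p ps ih =>
    intro m hps h0 h1
    simp only [List.foldl_cons]
    by_cases hc : PySem.List.pyGetD cs p.1 ' ' ≥ PySem.List.pyGetD cs m ' '
    · simp only [if_pos hc]
      exact ih p.1 (fun q hq => hps q (List.mem_cons_of_mem _ hq))
        (hps p List.mem_cons_self).1 (hps p List.mem_cons_self).2
    · simp only [if_neg hc]
      exact ih m (fun q hq => hps q (List.mem_cons_of_mem _ hq)) h0 h1

theorem mpA_nonneg (cs : List Char) : 0 ≤ mpA cs ∧ (cs ≠ [] → mpA cs < cs.length) := by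
  by_cases h : cs = []
  · subst h
    refine ⟨by simp [mpA, PySem.List.enumerate], fun h => absurd rfl h⟩
  · have hlen : (0:Int) < cs.length := by
      have := List.length_pos_of_ne_nil h; omega
    have := mpA_fold_bounds cs cs.length (PySem.List.enumerate cs 0) 0
      (by
        intro p hp
        rcases (PySem.List.mem_enumerate_iff cs 0 p).1 hp with ⟨k, hk, rfl⟩
        refine ⟨by simp, by simp; omega⟩)
      le_rfl hlen
    exact ⟨this.1, fun _ => this.2⟩

-- literal transliteration of A on the character list
def solveLA (cs : List Char) : List Char :=
  if cs.length = 0 then []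
  else
    let mp := mpA cs
    PySem.List.pyGetD cs mp ' ' ::
      (solveLA (PySem.List.slice cs none (some mp)) ++ PySem.List.slice cs (some (mp + 1)) none)
termination_by cs.length
decreasing_by
  have hne : cs ≠ [] := by intro h; subst h; simp_all
  have hb := mpA_nonneg cs
  have h := PySem.List.slice_to (xs := cs) (b := mpA cs) hb.1
  rw [h]
  have h1 := hb.2 hne
  simp only [List.length_take]
  omega

def solve (l : String) : String := String.ofList (solveLA l.toList)

-- ===== PORT B =====
-- one step of Source B's loop body; state is (picked, rest, best)
def stepB (s : List Char × List Char × Option Char) (c : Char) : List Char × List Char × Option Char :=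
  match s with
  | (picked, rest, best) =>
    if (match best with | none => true | some b => decide (c ≥ b)) then (picked ++ [c], rest, some c)
    else (picked, rest ++ [c], best)

def solve_alt (l : String) : String :=
  let s := l.toList.foldl stepB ([], [], none)
  String.ofList (s.1.reverse ++ s.2.1)

-- ===== PRECONDITION & SPEC =====
def Spec_solve (l : String) (out : String) : Prop := out = solve_alt l
instance (l : String) (out : String) : Decidable (Spec_solve l out) := by unfold Spec_solve; infer_instance

-- ===== CLAIM (what is proved, stated in full; the proofs are below) =====
def Claim_equal_solve : Prop := ∀ (l : String), Dom_solve l → Spec_solve l (solve l)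

-- ===== LEMMAS AND PROOFS =====

-- Nat-valued version of A's argmax fold (proof-side only)
def mpFoldN (cs : List Char) (n : Nat) : Nat :=
  (List.range n).foldl (fun m i => if cs.getD m ' ' ≤ cs.getD i ' ' then i else m) 0

theorem mpFoldN_succ (cs : List Char) (n : Nat) :
    mpFoldN cs (n + 1) = if cs.getD (mpFoldN cs n) ' ' ≤ cs.getD n ' ' then n else mpFoldN cs n := by
  simp [mpFoldN, List.range_succ]

theorem cast_fold (cs : List Char) (n : Nat) (m : Nat) :
    (List.range n).foldl
        (fun (m : Int) (i : Nat) =>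
          if PySem.List.pyGetD cs (i : Int) ' ' ≥ PySem.List.pyGetD cs m ' ' then (i : Int) else m)
        (m : Int) =
      (((List.range n).foldl (fun m i => if cs.getD m ' ' ≤ cs.getD i ' ' then i else m) m : Nat) : Int) := by
  induction n generalizing m with
  | zero => simp
  | succ n ih =>
    rw [List.range_succ, List.foldl_append, List.foldl_append, ih]
    simp [PySem.List.pyGetD_natCast, GE.ge]

theorem mpA_eq_cast (cs : List Char) : mpA cs = (mpFoldN cs cs.length : Int) := by
  have h1 : mpA cs =
      ((PySem.List.enumerate cs 0).map (fun p => p.1)).foldl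
        (fun (m : Int) (i : Int) =>
          if PySem.List.pyGetD cs i ' ' ≥ PySem.List.pyGetD cs m ' ' then i else m) 0 := by
    rw [List.foldl_map]; rfl
  rw [h1, PySem.List.map_fst_enumerate]
  simp only [zero_add]
  rw [PySem.List.pyRange_zero_natCast, List.foldl_map]
  have := cast_fold cs cs.length 0
  simpa [mpFoldN] using this

-- invariant: mpFoldN cs n is the LAST position of the maximum of the first n chars
theorem mpFoldN_spec (cs : List Char) (n : Nat) (hn : 0 < n) :
    mpFoldN cs n < n ∧
    (∀ j, j < n → cs.getD j ' ' ≤ cs.getD (mpFoldN cs n) ' ') ∧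
    (∀ j, j < n → mpFoldN cs n < j → cs.getD j ' ' < cs.getD (mpFoldN cs n) ' ') := by
  induction n with
  | zero => omega
  | succ n ih =>
    rw [mpFoldN_succ]
    by_cases h0 : n = 0
    · subst h0
      have h00 : mpFoldN cs 0 = 0 := rfl
      rw [h00, if_pos le_rfl]
      refine ⟨by omega, ?_, ?_⟩
      · intro j hj; interval_cases j; exact le_rfl
      · intro j hj hr; omega
    · obtain ⟨hlt, hmax, hlast⟩ := ih (by omega)
      by_cases hc : cs.getD (mpFoldN cs n) ' ' ≤ cs.getD n ' '
      · simp only [if_pos hc]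
        refine ⟨by omega, ?_, ?_⟩
        · intro j hj
          rcases Nat.lt_or_ge j n with h | h
          · exact le_trans (hmax j h) hc
          · have : j = n := by omega
            subst this; exact le_rfl
        · intro j hj hr; omega
      · simp only [if_neg hc]
        refine ⟨by omega, ?_, ?_⟩
        · intro j hj
          rcases Nat.lt_or_ge j n with h | h
          · exact hmax j h
          · have : j = n := by omega
            subst this; exact le_of_lt (lt_of_not_ge fun hge => hc hge)
        · intro j hj hr
          rcases Nat.lt_or_ge j n with h | h
          · exact hlast j h hr
          · have : j = n := by omega
            subst this; exact lt_of_not_ge fun hge => hc hge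

-- the final best of B's fold is the initial best or some processed element
theorem stepB_best (xs : List Char) :
    ∀ (p r : List Char) (b : Option Char),
      (xs.foldl stepB (p, r, b)).2.2 = b ∨ ∃ c ∈ xs, (xs.foldl stepB (p, r, b)).2.2 = some c := by
  induction xs with
  | nil => intro p r b; left; rfl
  | cons x xs ih =>
    intro p r b
    simp only [List.foldl_cons]
    by_cases hc : (match b with | none => true | some v => decide (x ≥ v)) = true
    · have hstep : stepB (p, r, b) x = (p ++ [x], r, some x) := by
        simp only [stepB, if_pos hc]
      rw [hstep]
      rcases ih (p ++ [x]) r (some x) with h | ⟨c, hc', h⟩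
      · right; exact ⟨x, List.mem_cons_self, h⟩
      · right; exact ⟨c, List.mem_cons_of_mem _ hc', h⟩
    · have hstep : stepB (p, r, b) x = (p, r ++ [x], b) := by
        simp only [stepB, if_neg hc]
      rw [hstep]
      rcases ih p (r ++ [x]) b with h | ⟨c, hc', h⟩
      · left; exact h
      · right; exact ⟨c, List.mem_cons_of_mem _ hc', h⟩

-- elements strictly below the current best are all appended to rest
theorem foldB_small (M : Char) (xs : List Char) :
    ∀ (p r : List Char), (∀ c ∈ xs, c < M) →
      xs.foldl stepB (p, r, some M) = (p, r ++ xs, some M) := by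
  induction xs with
  | nil => intro p r _; simp
  | cons x xs ih =>
    intro p r hall
    have hx : x < M := hall x List.mem_cons_self
    have hstep : stepB (p, r, some M) x = (p, r ++ [x], some M) := by
      simp only [stepB]
      rw [if_neg]
      simp only [decide_eq_true_eq]
      exact not_le_of_gt hx
    simp only [List.foldl_cons, hstep]
    rw [ih p (r ++ [x]) (fun c hc => hall c (List.mem_cons_of_mem _ hc))]
    simp

theorem main_eq (cs : List Char) :
    solveLA cs = (cs.foldl stepB ([], [], none)).1.reverse ++ (cs.foldl stepB ([], [], none)).2.1 := by
  have H : ∀ (n : Nat) (cs : List Char), cs.length = n →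
      solveLA cs = (cs.foldl stepB ([], [], none)).1.reverse ++ (cs.foldl stepB ([], [], none)).2.1 := by
    intro n
    induction n using Nat.strong_induction_on with
    | _ n ih =>
      intro cs hlen
      by_cases hnil : cs = []
      · subst hnil; rw [solveLA]; simp
      · have hL : 0 < cs.length := List.length_pos_of_ne_nil hnil
        set mp := mpFoldN cs cs.length with hmp
        obtain ⟨hlt, hmax, hlast⟩ := mpFoldN_spec cs cs.length hL
        -- unfold A once and rewrite the slices
        rw [solveLA]
        rw [if_neg (by omega)]
        simp only
        rw [mpA_eq_cast]
        rw [PySem.List.slice_to_natCast (xs := cs) (b := mp)]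
        have hfrom : PySem.List.slice cs (some ((mp : Int) + 1)) none = cs.drop (mp + 1) := by
          have : ((mp : Int) + 1) = ((mp + 1 : Nat) : Int) := by push_cast; ring
          rw [this, PySem.List.slice_from_natCast]
        rw [hfrom, PySem.List.pyGetD_natCast]
        have hget : cs.getD mp ' ' = cs[mp] := List.getD_eq_getElem cs ' ' hlt
        -- decompose cs for the B-side fold
        have hdecomp : cs = cs.take mp ++ (cs[mp] :: cs.drop (mp + 1)) := by
          conv_lhs => rw [← List.take_append_drop mp cs]
          rw [List.drop_eq_getElem_cons hlt]
        rw [← hmp, hget]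
        -- fold over the take-part
        rcases h1 : (cs.take mp).foldl stepB ([], [], none) with ⟨pt, rt, bt⟩
        -- the pivot is picked: bt is none or an element of cs.take mp, all ≤ cs[mp]
        have hbt := stepB_best (cs.take mp) [] [] none
        rw [h1] at hbt
        simp only at hbt
        have hcond : ∀ (b : Option Char), (b = none ∨ ∃ c ∈ List.take mp cs, b = some c) →
            (match b with | none => true | some v => decide (cs[mp] ≥ v)) = true := by
          intro b hb
          rcases hb with hb | ⟨c, hc, hb⟩
          · subst hb; rfl
          · subst hb
            simp only [decide_eq_true_eq]
            rcases List.mem_iff_getElem.1 hc with ⟨i, hi, hie⟩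
            have hi' : i < cs.length := by
              have := hi; simp only [List.length_take] at this; omega
            have : c = cs[i] := by rw [← hie]; exact List.getElem_take
            subst this
            have := hmax i hi'
            rwa [List.getD_eq_getElem cs ' ' hi', hget] at this
        -- everything after the pivot is strictly smaller
        have hdropsmall : ∀ c ∈ cs.drop (mp + 1), c < cs[mp] := by
          intro c hc
          rcases List.mem_iff_getElem.1 hc with ⟨i, hi, hie⟩
          have hi' : mp + 1 + i < cs.length := by
            have := hi; simp only [List.length_drop] at this; omega
          have : c = cs[mp + 1 + i] := by rw [← hie]; exact List.getElem_drop
          subst this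
          have := hlast (mp + 1 + i) hi' (by omega)
          rwa [List.getD_eq_getElem cs ' ' hi', hget] at this
        have hfold : cs.foldl stepB ([], [], none) =
            (pt ++ [cs[mp]], rt ++ cs.drop (mp + 1), some cs[mp]) := by
          conv_lhs => rw [hdecomp]
          rw [List.foldl_append, h1]
          simp only [List.foldl_cons]
          have hstep : stepB (pt, rt, bt) cs[mp] = (pt ++ [cs[mp]], rt, some cs[mp]) := by
            simp only [stepB]
            rw [if_pos (hcond bt hbt)]
          rw [hstep]
          exact foldB_small cs[mp] (cs.drop (mp + 1)) (pt ++ [cs[mp]]) rt hdropsmall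
        rw [hfold]
        -- solve the prefix by the induction hypothesis
        have hihlen : (cs.take mp).length < n := by
          simp only [List.length_take]; omega
        have hih := ih (cs.take mp).length (by omega) (cs.take mp) rfl
        rw [h1] at hih
        simp only at hih
        rw [hih]
        simp [List.append_assoc]
  exact H cs.length cs rfl

-- ===== VERDICT (by name: the statement is the Claim_ definition above) =====
theorem solve_spec : Claim_equal_solve := by
  intro l _
  unfold Spec_solve solve solve_alt
  rw [main_eq]
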